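-- pv_equiv track=rewrite | github.com/MrBrantCode/unitest_baseline | mut_generate/mist_train_taco/taco_6412/solution.py | printNumHavingAltBitPatrn
-- ===== SOURCE A (Python) =====
-- def printNumHavingAltBitPatrn(N):
--     ans = []
--     n = 1
--     m = 0
--     while n <= N:
--         ans.append(n)
--         n = (n << 1) + m
--         m = 1 - m
--     return ans
-- ===== SOURCE B (Python) =====
-- def printNumHavingAltBitPatrn(N):
--     ans = []
--     L = 1
--     while True:
--         v = (2 ** (L + 1) - (1 if L % 2 == 1 else 2)) // 3
--         if v > N:
--             break
--         ans.append(v)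
--         L += 1
--     return ans
-- ===== Notes on version B (the rewrite author's own statement) =====
-- stated objective: alternative
-- what changed: Each alternating-bit number is computed independently from its bit-length L via the closed form (2**(L+1) - (1 if L odd else 2)) // 3, instead of being derived incrementally from the previous term by shift-and-add state (n, m).
import Mathlib
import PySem

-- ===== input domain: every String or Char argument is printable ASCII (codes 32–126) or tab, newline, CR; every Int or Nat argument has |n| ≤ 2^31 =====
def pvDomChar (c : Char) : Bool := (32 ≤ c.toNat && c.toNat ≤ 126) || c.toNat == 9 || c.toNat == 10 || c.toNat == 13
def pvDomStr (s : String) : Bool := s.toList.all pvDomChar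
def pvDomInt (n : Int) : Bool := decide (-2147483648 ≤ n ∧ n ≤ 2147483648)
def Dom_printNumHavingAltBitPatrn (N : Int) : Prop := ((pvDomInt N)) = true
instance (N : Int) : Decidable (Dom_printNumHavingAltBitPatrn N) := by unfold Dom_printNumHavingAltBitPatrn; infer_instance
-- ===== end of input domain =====

-- B computes each alternating-bit number directly from its bit-length L by the closed
-- form (2^(L+1) - (1 if L odd else 2)) // 3, instead of A's incremental shift-and-add
-- state (n, m); same cost, different decomposition (objective: alternative).

-- ===== PORT A =====
-- Python 'n << 1' is ported as 'n * 2' (exact on Python ints).  The hn/hm proof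
-- parameters only justify termination of the while-loop; they carry no data.
def pvALoop (N : Int) (ans : List Int) (n m : Int)
    (hn : 1 ≤ n) (hm : m = 0 ∨ m = 1) : List Int :=
  if _h : n ≤ N then
    pvALoop N (ans ++ [n]) (n * 2 + m) (1 - m) (by omega) (by omega)
  else ans
termination_by (N + 1 - n).toNat
decreasing_by omega

def printNumHavingAltBitPatrn (N : Int) : List Int :=
  pvALoop N [] 1 0 (by omega) (Or.inl rfl)

-- ===== PORT B =====
-- v = (2**(L+1) - (1 if L % 2 == 1 else 2)) // 3  (Python '//' = PySem.Int.floordiv)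
def pvVal (L : Nat) : Int :=
  PySem.Int.floordiv (2 ^ (L + 1) - (if L % 2 = 1 then 1 else 2)) 3

-- termination lemmas for the B-side loop (cited by pvBLoop's decreasing_by)
lemma pvPow2_emod3 (L : Nat) : (2 : Int) ^ L % 3 = if L % 2 = 0 then 1 else 2 := by
  induction L with
  | zero => decide
  | succ k ih =>
    rcases Nat.even_or_odd k with hk | hk
    · have h2 : k % 2 = 0 := Nat.even_iff.mp hk
      have h3 : (k + 1) % 2 = 1 := by omega
      simp [h2] at ih
      simp [h3, pow_succ]
      omega
    · have h2 : k % 2 = 1 := Nat.odd_iff.mp hk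
      have h3 : (k + 1) % 2 = 0 := by omega
      simp [h2] at ih
      simp [h3, pow_succ]
      omega

lemma pvThree_mul_pvVal (L : Nat) :
    3 * pvVal L = 2 ^ (L + 1) - (if L % 2 = 1 then 1 else 2) := by
  have hmod := pvPow2_emod3 (L + 1)
  have hdvd : (3 : Int) ∣ (2 ^ (L + 1) - (if L % 2 = 1 then 1 else 2)) := by
    rcases Nat.even_or_odd L with hL | hL
    · have h2 : L % 2 = 0 := Nat.even_iff.mp hL
      have h3 : (L + 1) % 2 = 1 := by omega
      simp [h2, h3] at hmod ⊢
      omega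
    · have h2 : L % 2 = 1 := Nat.odd_iff.mp hL
      have h3 : (L + 1) % 2 = 0 := by omega
      simp [h2, h3] at hmod ⊢
      omega
  unfold pvVal
  rw [PySem.Int.floordiv_eq_ediv_of_pos (by omega)]
  exact (Int.mul_ediv_cancel' hdvd)

lemma pvVal_succ (L : Nat) :
    pvVal (L + 1) = 2 * pvVal L + (if (L + 1) % 2 = 1 then 1 else 0) := by
  have h1 := pvThree_mul_pvVal L
  have h2 := pvThree_mul_pvVal (L + 1)
  have hp : (2 : Int) ^ (L + 1 + 1) = 2 * 2 ^ (L + 1) := by ring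
  rcases Nat.even_or_odd L with hL | hL
  · have e2 : L % 2 = 1 ↔ False := by simp [Nat.even_iff.mp hL]
    have e3 : (L + 1) % 2 = 1 := by have := Nat.even_iff.mp hL; omega
    simp [e2, e3] at h1 h2 ⊢
    omega
  · have e2 : L % 2 = 1 := Nat.odd_iff.mp hL
    have e3 : (L + 1) % 2 = 0 := by omega
    simp [e2, e3] at h1 h2 ⊢
    omega

lemma pvVal_ge (L : Nat) (hL : 1 ≤ L) : (L : Int) ≤ pvVal L := by
  induction L with
  | zero => omega
  | succ k ih =>
    rcases Nat.eq_or_lt_of_le hL with h | h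
    · have hk0 : k = 0 := by omega
      subst hk0
      decide
    · have hk : 1 ≤ k := by omega
      have hik := ih hk
      have hs := pvVal_succ k
      push_cast
      split_ifs at hs <;> push_cast at hik ⊢ <;> omega

def pvBLoop (N : Int) (ans : List Int) (L : Nat) (hL : 1 ≤ L) : List Int :=
  if _h : pvVal L > N then ans
  else pvBLoop N (ans ++ [pvVal L]) (L + 1) (by omega)
termination_by N.toNat + 1 - L
decreasing_by
  have := pvVal_ge L hL
  omega

def printNumHavingAltBitPatrn_alt (N : Int) : List Int :=
  pvBLoop N [] 1 (by omega)

-- ===== PRECONDITION & SPEC =====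
def Spec_printNumHavingAltBitPatrn (N : Int) (out : List Int) : Prop := out = printNumHavingAltBitPatrn_alt N
instance (N : Int) (out : List Int) : Decidable (Spec_printNumHavingAltBitPatrn N out) := by unfold Spec_printNumHavingAltBitPatrn; infer_instance

-- ===== CLAIM (what is proved, stated in full; the proofs are below) =====
def Claim_equal_printNumHavingAltBitPatrn : Prop := ∀ (N : Int), Dom_printNumHavingAltBitPatrn N → Spec_printNumHavingAltBitPatrn N (printNumHavingAltBitPatrn N)

-- ===== LEMMAS AND PROOFS =====

lemma pvALoop_congr (N : Int) (ans : List Int) {n n' m m' : Int}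
    (en : n = n') (em : m = m')
    (hn : 1 ≤ n) (hm : m = 0 ∨ m = 1) (hn' : 1 ≤ n') (hm' : m' = 0 ∨ m' = 1) :
    pvALoop N ans n m hn hm = pvALoop N ans n' m' hn' hm' := by
  subst en; subst em; rfl

lemma pvLoop_eq (L : Nat) (hL : 1 ≤ L) (N : Int) (ans : List Int)
    (h1 : 1 ≤ pvVal L)
    (h2 : (1 - ((L % 2 : Nat) : Int)) = 0 ∨ (1 - ((L % 2 : Nat) : Int)) = 1) :
    pvALoop N ans (pvVal L) (1 - ((L % 2 : Nat) : Int)) h1 h2 = pvBLoop N ans L hL := by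
  rw [pvALoop, pvBLoop]
  by_cases h : pvVal L ≤ N
  · rw [dif_pos h, dif_neg (by omega)]
    have en : pvVal L * 2 + (1 - ((L % 2 : Nat) : Int)) = pvVal (L + 1) := by
      have hs := pvVal_succ L
      have hm2 : L % 2 = 0 ∨ L % 2 = 1 := by omega
      rcases hm2 with hm2 | hm2 <;>
        · have h3 : (L + 1) % 2 = 1 - L % 2 := by omega
          simp [hm2, h3] at hs ⊢
          omega
    have em : 1 - (1 - ((L % 2 : Nat) : Int)) = 1 - (((L + 1) % 2 : Nat) : Int) := by
      have hm2 : L % 2 = 0 ∨ L % 2 = 1 := by omega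
      rcases hm2 with hm2 | hm2 <;>
        · have h3 : (L + 1) % 2 = 1 - L % 2 := by omega
          simp [hm2, h3]
    rw [pvALoop_congr N (ans ++ [pvVal L]) en em _ _ (by omega) (by omega)]
    exact pvLoop_eq (L + 1) (by omega) N (ans ++ [pvVal L]) (by omega)
      (by omega)
  · rw [dif_neg h, dif_pos (by omega)]
termination_by N.toNat + 1 - L
decreasing_by
  have := pvVal_ge L hL
  omega

-- ===== VERDICT (by name: the statement is the Claim_ definition above) =====
theorem printNumHavingAltBitPatrn_spec : Claim_equal_printNumHavingAltBitPatrn := by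
  intro N _
  unfold Spec_printNumHavingAltBitPatrn printNumHavingAltBitPatrn printNumHavingAltBitPatrn_alt
  have hv : (1 : Int) = pvVal 1 := by decide
  have hm : (0 : Int) = 1 - ((1 % 2 : Nat) : Int) := by decide
  rw [pvALoop_congr N [] hv hm _ _ (by decide) (by decide)]
  exact pvLoop_eq 1 (by omega) N [] (by decide) (by decide)
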